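-- pv_equiv track=rewrite | github.com/billbrasky/project_euler-python | solutions/032.py | singlecounts
-- ===== SOURCE A (Python) =====
-- def singlecounts( n, testlength = None ):
--
--     s = str( n )
--     if testlength is not None and len( s ) != testlength:
--         return False
--
--     if '0' in s:
--         return False
--
--     x = sum( [s.count( c ) for c in s] )
--
--     return x == len( s )
-- ===== SOURCE B (Python) =====
-- def singlecounts(n, testlength=None):
--     s = str(n)
--     if testlength is not None and len(s) != testlength:
--         return False
--     seen = set()
--     for c in s:
--         if c == '0' or c in seen:
--             return False
--         seen.add(c)
--     return True
-- ===== Notes on version B (the rewrite author's own statement) =====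
-- stated objective: simpler
-- what changed: A's staged '0'-membership test plus an O(d^2) sum of per-character substring counts compared with len(s) is replaced by one left-to-right pass over the string with a running seen-set that returns False immediately on a '0' or a repeated character.
import Mathlib
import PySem

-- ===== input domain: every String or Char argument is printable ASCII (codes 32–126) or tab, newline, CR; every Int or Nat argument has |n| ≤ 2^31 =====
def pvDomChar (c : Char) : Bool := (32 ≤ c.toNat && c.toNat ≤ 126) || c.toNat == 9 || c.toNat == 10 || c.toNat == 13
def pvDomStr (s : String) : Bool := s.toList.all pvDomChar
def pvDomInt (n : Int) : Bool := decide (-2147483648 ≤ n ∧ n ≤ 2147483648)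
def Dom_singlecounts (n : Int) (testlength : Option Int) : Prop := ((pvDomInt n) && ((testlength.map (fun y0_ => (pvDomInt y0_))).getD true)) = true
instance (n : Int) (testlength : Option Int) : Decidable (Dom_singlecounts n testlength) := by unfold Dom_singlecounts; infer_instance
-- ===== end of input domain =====

-- B replaces A's staged guards plus O(d^2) sum of per-character counts by one pass with a running seen-set (simpler).

-- ===== PORT A =====
def singlecounts (n : Int) (testlength : Option Int) : Bool :=
  let s := PySem.Int.toChars n
  match testlength with
  | some t =>
    if PySem.Chars.len s ≠ t then false
    else if PySem.Chars.isIn ['0'] s then false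
    else decide ((s.map (fun c => (PySem.Chars.count s [c] : Int))).sum = PySem.Chars.len s)
  | none =>
    if PySem.Chars.isIn ['0'] s then false
    else decide ((s.map (fun c => (PySem.Chars.count s [c] : Int))).sum = PySem.Chars.len s)

-- ===== PORT B =====
-- B's for-loop over the characters with early return: carries the Python 'seen' set
def pvSeenLoop (seen : PySem.Set Char) : List Char → Bool
  | [] => true
  | c :: rest =>
    if c = '0' ∨ PySem.Set.contains seen c then false
    else pvSeenLoop (PySem.Set.add seen c) rest

def singlecounts_alt (n : Int) (testlength : Option Int) : Bool :=
  let s := PySem.Int.toChars n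
  if (testlength.map (fun t => decide (PySem.Chars.len s ≠ t))).getD false then false
  else pvSeenLoop PySem.Set.empty s

-- ===== PRECONDITION & SPEC =====
def Spec_singlecounts (n : Int) (testlength : Option Int) (out : Bool) : Prop := out = singlecounts_alt n testlength
instance (n : Int) (testlength : Option Int) (out : Bool) : Decidable (Spec_singlecounts n testlength out) := by unfold Spec_singlecounts; infer_instance

-- ===== CLAIM (what is proved, stated in full; the proofs are below) =====
def Claim_equal_singlecounts : Prop := ∀ (n : Int) (testlength : Option Int), Dom_singlecounts n testlength → Spec_singlecounts n testlength (singlecounts n testlength)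

-- ===== LEMMAS AND PROOFS =====

-- substring count of a single-character needle is the character count
theorem pv_count_go_single (c : Char) : ∀ (l : List Char) (fuel acc : Nat), l.length ≤ fuel →
    PySem.Chars.count.go [c] fuel l acc = acc + l.count c := by
  intro l
  induction l with
  | nil =>
    intro fuel acc _
    cases fuel <;> simp [PySem.Chars.count.go]
  | cons h t ih =>
    intro fuel acc hle
    cases fuel with
    | zero => simp at hle
    | succ f =>
      have ht : t.length ≤ f := by simpa using hle
      have hstep : PySem.Chars.count.go [c] (f + 1) (h :: t) acc =
          (if List.isPrefixOf [c] (h :: t) then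
            PySem.Chars.count.go [c] f (List.drop (List.length [c]) (h :: t)) (acc + 1)
          else PySem.Chars.count.go [c] f t acc) := rfl
      rw [hstep]
      by_cases hc : c = h
      · subst hc
        have hpre : List.isPrefixOf [c] (c :: t) = true := by simp [List.isPrefixOf]
        rw [hpre, if_pos rfl]
        simp only [List.length_cons, List.length_nil, List.drop_succ_cons, List.drop_zero]
        rw [ih f (acc + 1) ht]
        simp
        omega
      · have hpre : List.isPrefixOf [c] (h :: t) = false := by simp [List.isPrefixOf, hc]
        rw [hpre]
        simp only [Bool.false_eq_true, if_false]
        rw [ih f acc ht]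
        simp [List.count_cons]
        exact fun he => hc he.symm

theorem pv_count_single (s : List Char) (c : Char) :
    PySem.Chars.count s [c] = s.count c := by
  simp [PySem.Chars.count, pv_count_go_single c s s.length 0 le_rfl]

-- A's check: the sum of the counts equals the length iff the characters are distinct
theorem pv_sum_counts_iff (s : List Char) :
    ((s.map (fun c => (PySem.Chars.count s [c] : Int))).sum = PySem.Chars.len s) ↔ s.Nodup := by
  have hcast : (s.map (fun c => (PySem.Chars.count s [c] : Int))).sum
      = ((s.map (fun c => s.count c)).sum : Int) := by
    simp only [pv_count_single]
    rw [Nat.cast_list_sum, List.map_map]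
    rfl
  rw [hcast, PySem.Chars.len_eq, Nat.cast_inj]
  constructor
  · intro h
    by_contra hnd
    obtain ⟨a, ha⟩ : ∃ a, ¬ s.count a ≤ 1 := by
      by_contra hall
      push Not at hall
      exact hnd (List.nodup_iff_count_le_one.mpr hall)
    have hmem : a ∈ s := List.count_pos_iff.mp (by omega)
    have hlt : (s.map (fun _ => 1)).sum < (s.map (fun c => s.count c)).sum := by
      refine List.sum_lt_sum (fun _ => 1) (fun c => s.count c) (fun i hi => ?_)
        ⟨a, hmem, by show (1 : ℕ) < s.count a; omega⟩
      exact List.count_pos_iff.mpr hi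
    have hlen : (s.map (fun _ => 1)).sum = s.length := by
      simp [List.map_const', List.sum_replicate]
    omega
  · intro hnd
    have : s.map (fun c => s.count c) = s.map (fun _ => 1) :=
      List.map_congr_left (fun c hc => List.count_eq_one_of_mem hnd hc)
    rw [this]
    simp [List.map_const', List.sum_replicate]

-- single-character 'in' on a string is membership
theorem pv_isIn_single (s : List Char) :
    PySem.Chars.isIn ['0'] s = true ↔ ('0' : Char) ∈ s := by
  rw [PySem.Chars.isIn_iff_infix]
  constructor
  · intro h
    exact (List.singleton_sublist.mp h.sublist)
  · intro h
    obtain ⟨l1, l2, rfl⟩ := List.append_of_mem h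
    exact ⟨l1, l2, by simp⟩

-- B's loop returns true iff: no '0', no duplicates, and nothing already seen
theorem pv_seenLoop_iff (s : List Char) : ∀ seen : PySem.Set Char,
    pvSeenLoop seen s = true ↔ (('0' : Char) ∉ s ∧ s.Nodup ∧ ∀ c ∈ s, c ∉ seen) := by
  induction s with
  | nil => intro seen; simp [pvSeenLoop]
  | cons c rest ih =>
    intro seen
    by_cases h : c = '0' ∨ PySem.Set.contains seen c
    · simp only [pvSeenLoop, if_pos h, Bool.false_eq_true, false_iff]
      rcases h with h | h
      · subst h; simp
      · intro ⟨_, _, hns⟩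
        exact hns c (by simp) (List.contains_iff_mem.mp h)
    · obtain ⟨hc0, hcs⟩ : ¬ c = '0' ∧ ¬ PySem.Set.contains seen c = true := by
        constructor <;> (intro hx; exact h (by tauto))
      rw [pvSeenLoop, if_neg (by tauto), ih (PySem.Set.add seen c)]
      constructor
      · intro ⟨h0, hnd, hns⟩
        refine ⟨?_, ?_, ?_⟩
        · intro hm
          rcases List.mem_cons.mp hm with he | hm
          · exact hc0 he.symm
          · exact h0 hm
        · exact List.nodup_cons.mpr
            ⟨fun hm => (hns c hm) ((PySem.Set.mem_add seen c c).mpr (Or.inr rfl)), hnd⟩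
        · intro d hd
          rcases List.mem_cons.mp hd with rfl | hd
          · exact fun hm => hcs (List.contains_iff_mem.mpr hm)
          · intro hm
            exact (hns d hd) ((PySem.Set.mem_add seen c d).mpr (Or.inl hm))
      · intro ⟨h0, hnd, hns⟩
        have h0' : ('0' : Char) ∉ rest := fun hm => h0 (List.mem_cons.mpr (Or.inr hm))
        obtain ⟨hcr, hndr⟩ := List.nodup_cons.mp hnd
        refine ⟨h0', hndr, ?_⟩
        intro d hd hm
        rcases (PySem.Set.mem_add seen c d).mp hm with hm | rfl
        · exact hns d (List.mem_cons.mpr (Or.inr hd)) hm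
        · exact hcr hd

-- ===== VERDICT (by name: the statement is the Claim_ definition above) =====
theorem singlecounts_spec : Claim_equal_singlecounts := by
  intro n testlength _
  unfold Spec_singlecounts singlecounts singlecounts_alt
  have hcore : ∀ s : List Char,
      (if PySem.Chars.isIn ['0'] s then false
       else decide ((s.map (fun c => (PySem.Chars.count s [c] : Int))).sum = PySem.Chars.len s))
      = pvSeenLoop PySem.Set.empty s := by
    intro s
    by_cases h0 : PySem.Chars.isIn ['0'] s
    · rw [if_pos h0]
      symm
      rw [← Bool.not_eq_true]
      intro hl
      obtain ⟨hn0, _, _⟩ := (pv_seenLoop_iff s PySem.Set.empty).mp hl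
      exact hn0 ((pv_isIn_single s).mp h0)
    · rw [if_neg h0]
      have h0' : ('0' : Char) ∉ s := fun hm => h0 ((pv_isIn_single s).mpr hm)
      by_cases hl : pvSeenLoop PySem.Set.empty s = true
      · rw [hl, decide_eq_true_eq]
        exact (pv_sum_counts_iff s).mpr ((pv_seenLoop_iff s PySem.Set.empty).mp hl).2.1
      · rw [Bool.not_eq_true] at hl
        rw [hl, decide_eq_false_iff_not]
        intro hsum
        have hT : pvSeenLoop PySem.Set.empty s = true :=
          (pv_seenLoop_iff s PySem.Set.empty).mpr
            ⟨h0', (pv_sum_counts_iff s).mp hsum, by simp [PySem.Set.empty]⟩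
        rw [hT] at hl; exact Bool.noConfusion hl
  cases testlength with
  | none => simpa using hcore (PySem.Int.toChars n)
  | some t =>
    cases hd : decide (PySem.Chars.len (PySem.Int.toChars n) ≠ t) with
    | false =>
      have hlen : ¬ PySem.Chars.len (PySem.Int.toChars n) ≠ t :=
        of_decide_eq_false hd
      simp only [Option.map_some, Option.getD_some, hd, Bool.false_eq_true,
        if_false, if_neg hlen]
      exact hcore (PySem.Int.toChars n)
    | true =>
      have hlen : PySem.Chars.len (PySem.Int.toChars n) ≠ t :=
        of_decide_eq_true hd
      simp only [Option.map_some, Option.getD_some, hd, if_true, if_pos hlen]
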